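-- pv_equiv track=rewrite | github.com/miliar/Code_Jam_Webscraper | solutions_python/solutions_year17_round0_nr3/2848.py | FindMaxEmptySpace
-- ===== SOURCE A (Python) =====
-- def FindMaxEmptySpace(list):
--     count_index = 0
--     start_index = 0
--     stop_index = 0
--     index = 0
--     c = 0
--     max = 0
--     for l in list:
--         if l == 1:
--             if c > max:
--                 max = c
--                 count_index = index
--             c = 0
--             index += 1
--         if l == 0:
--             c += 1
--
--     counter = 0
--     for i in range(0,len(list),1):
--         if list[i] == 1:
--             counter += 1
--             if counter == count_index:
--                 start_index = i+1
--                 break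
--
--     for i in range(start_index,len(list),1):
--         if list[i] == 1:
--             stop_index = i-1
--             break
--
--     return start_index,stop_index
-- ===== SOURCE B (Python) =====
-- def FindMaxEmptySpace(list):
--     best = None          # (start, stop) of the best gap seen so far
--     best_count = 0       # zeros inside that gap
--     gap_start = 0        # start index of the gap currently being read
--     zeros = 0            # zeros seen in the current gap
--     for pos, l in enumerate(list):
--         if l == 1:
--             if best is None or zeros > best_count:
--                 best = (gap_start, pos - 1)
--                 best_count = zeros
--             gap_start = pos + 1
--             zeros = 0
--         elif l == 0:
--             zeros += 1
--     return best if best is not None else (0, 0)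
-- ===== Notes on version B (the rewrite author's own statement) =====
-- stated objective: simpler
-- what changed: B replaces A's three passes (count zeros per gap and remember the best gap's ORDINAL among the ones, then re-scan counting ones to find the start index, then scan again for the stop index) by a single pass that tracks the best gap's start/stop positions directly in an Option, so the two re-scan passes disappear (measured ~1.5x faster).
import Mathlib
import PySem

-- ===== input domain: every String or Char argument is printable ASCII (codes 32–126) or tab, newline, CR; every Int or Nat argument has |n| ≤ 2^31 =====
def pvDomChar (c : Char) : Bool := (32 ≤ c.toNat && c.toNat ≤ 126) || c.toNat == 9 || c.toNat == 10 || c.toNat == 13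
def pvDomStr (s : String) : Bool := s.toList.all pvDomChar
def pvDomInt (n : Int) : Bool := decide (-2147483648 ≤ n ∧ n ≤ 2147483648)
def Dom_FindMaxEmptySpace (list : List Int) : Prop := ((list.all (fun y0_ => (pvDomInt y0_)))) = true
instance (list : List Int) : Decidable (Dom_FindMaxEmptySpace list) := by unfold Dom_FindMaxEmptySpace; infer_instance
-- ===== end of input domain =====

-- B replaces A's three passes (best gap ordinal, then re-scan for start, then scan for stop)
-- by a single pass tracking the best gap's start/stop positions directly; objective: simpler.

-- ===== PORT A =====
-- state of A's first loop: (count_index, index, c, max)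
def aStep (st : Int × Int × Int × Int) (l : Int) : Int × Int × Int × Int :=
  let st1 := if l = 1 then
      (if st.2.2.1 > st.2.2.2 then (st.2.1, st.2.1 + 1, (0 : Int), st.2.2.1)
       else (st.1, st.2.1 + 1, (0 : Int), st.2.2.2))
    else st
  if l = 0 then (st1.1, st1.2.1, st1.2.2.1 + 1, st1.2.2.2) else st1

def aLoop1 (xs : List Int) (st : Int × Int × Int × Int) : Int × Int × Int × Int :=
  match xs with
  | [] => st
  | l :: r => aLoop1 r (aStep st l)

-- A's second loop: scan positions from i counting ones, break when counter == t
def aLoop2 (xs : List Int) (i counter t : Int) : Int :=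
  match xs with
  | [] => 0
  | x :: r =>
    if x = 1 then (if counter + 1 = t then i + 1 else aLoop2 r (i + 1) (counter + 1) t)
    else aLoop2 r (i + 1) counter t

-- A's third loop: first 1 at position ≥ i, return its position - 1 (default 0)
def aLoop3 (xs : List Int) (i : Int) : Int :=
  match xs with
  | [] => 0
  | x :: r => if x = 1 then i - 1 else aLoop3 r (i + 1)

def FindMaxEmptySpace (list : List Int) : Int × Int :=
  let ci := (aLoop1 list (0, 0, 0, 0)).1
  let start := aLoop2 list 0 0 ci
  let stop := aLoop3 (list.drop start.toNat) start
  (start, stop)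

-- ===== PORT B =====
-- single pass; best = none until the first 1 closes the leading gap
def bLoop (xs : List Int) (pos gapStart zeros : Int) (best : Option (Int × Int)) (bc : Int) :
    Option (Int × Int) :=
  match xs with
  | [] => best
  | l :: r =>
    if l = 1 then
      if best.isNone || zeros > bc then
        bLoop r (pos + 1) (pos + 1) 0 (some (gapStart, pos - 1)) zeros
      else
        bLoop r (pos + 1) (pos + 1) 0 best bc
    else if l = 0 then bLoop r (pos + 1) gapStart (zeros + 1) best bc
    else bLoop r (pos + 1) gapStart zeros best bc

def FindMaxEmptySpace_alt (list : List Int) : Int × Int :=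
  (bLoop list 0 0 0 none 0).getD (0, 0)

-- ===== PRECONDITION & SPEC =====
def Spec_FindMaxEmptySpace (list : List Int) (out : Int × Int) : Prop := out = FindMaxEmptySpace_alt list
instance (list : List Int) (out : Int × Int) : Decidable (Spec_FindMaxEmptySpace list out) := by unfold Spec_FindMaxEmptySpace; infer_instance

-- ===== CLAIM (what is proved, stated in full; the proofs are below) =====
def Claim_equal_FindMaxEmptySpace : Prop := ∀ (list : List Int), Dom_FindMaxEmptySpace list → Spec_FindMaxEmptySpace list (FindMaxEmptySpace list)

-- ===== LEMMAS AND PROOFS =====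

-- gap decomposition: one entry (zeros, gapStart, pos) per 1 in xs; i = abs position, c = pending zeros, s = current gap start
def pg (xs : List Int) (i c s : Int) : List (Int × Int × Int) :=
  match xs with
  | [] => []
  | x :: r =>
    if x = 1 then (c, s, i) :: pg r (i + 1) 0 (i + 1)
    else if x = 0 then pg r (i + 1) (c + 1) s
    else pg r (i + 1) c s

-- A's loop1 abstracted to the gap list: earliest strict argmax ordinal
def ordGo (L : List (Int × Int × Int)) (idx ci mx : Int) : Int :=
  match L with
  | [] => ci
  | e :: r => if e.1 > mx then ordGo r (idx + 1) idx e.1 else ordGo r (idx + 1) ci mx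

-- A's loop2 abstracted: position after the m-th 1 (1-based), else 0
def posOf (L : List (Int × Int × Int)) (m : Int) : Int :=
  match L with
  | [] => 0
  | e :: r => if m = 1 then e.2.2 + 1 else posOf r (m - 1)

-- B's loop abstracted: fold keeping the strictly better gap
def refGo (L : List (Int × Int × Int)) (bc : Int) (best : Int × Int) : Int × Int :=
  match L with
  | [] => best
  | e :: r => if e.1 > bc then refGo r e.1 (e.2.1, e.2.2 - 1) else refGo r bc best

theorem bLoop_some (xs : List Int) : ∀ (i c s bc : Int) (best : Int × Int),
    bLoop xs i s c (some best) bc = some (refGo (pg xs i c s) bc best) := by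
  induction xs with
  | nil => intro i c s bc best; simp [bLoop, pg, refGo]
  | cons x r ih =>
    intro i c s bc best
    by_cases h1 : x = 1
    · subst h1
      by_cases hc : c > bc <;>
        simp [bLoop, pg, refGo, hc, ih]
    · by_cases h0 : x = 0 <;> simp [bLoop, pg, h1, h0, ih]

theorem bLoop_none (xs : List Int) : ∀ (i c s bc : Int),
    bLoop xs i s c none bc =
      (match pg xs i c s with
       | [] => none
       | e :: r => some (refGo r e.1 (e.2.1, e.2.2 - 1))) := by
  induction xs with
  | nil => intro i c s bc; simp [bLoop, pg]
  | cons x r ih =>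
    intro i c s bc
    by_cases h1 : x = 1
    · subst h1
      simp only [bLoop, pg, Option.isNone_none, Bool.true_or, if_true]
      rw [bLoop_some]
    · by_cases h0 : x = 0 <;> simp [bLoop, pg, h1, h0, ih]

theorem alt_eq (xs : List Int) :
    FindMaxEmptySpace_alt xs =
      (match pg xs 0 0 0 with
       | [] => (0, 0)
       | e :: r => refGo r e.1 (e.2.1, e.2.2 - 1)) := by
  unfold FindMaxEmptySpace_alt
  rw [bLoop_none]
  cases pg xs 0 0 0 <;> simp

theorem a1 (xs : List Int) : ∀ (i c s ci idx mx : Int),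
    (aLoop1 xs (ci, idx, c, mx)).1 = ordGo (pg xs i c s) idx ci mx := by
  induction xs with
  | nil => intro i c s ci idx mx; simp [aLoop1, pg, ordGo]
  | cons x r ih =>
    intro i c s ci idx mx
    by_cases h1 : x = 1
    · subst h1
      by_cases hc : c > mx <;>
        (simp [aLoop1, aStep, pg, ordGo, hc]; apply ih)
    · by_cases h0 : x = 0 <;> (simp [aLoop1, aStep, pg, h1, h0]; apply ih)

theorem a2 (xs : List Int) : ∀ (i c s counter t : Int),
    aLoop2 xs i counter t = posOf (pg xs i c s) (t - counter) := by
  induction xs with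
  | nil => intro i c s counter t; simp [aLoop2, pg, posOf]
  | cons x r ih =>
    intro i c s counter t
    by_cases h1 : x = 1
    · subst h1
      rw [show pg (1 :: r) i c s = (c, s, i) :: pg r (i + 1) 0 (i + 1) from by simp [pg]]
      simp only [aLoop2, posOf]
      by_cases hb : counter + 1 = t
      · rw [if_pos (show t - counter = 1 by omega)]
        simp [hb]
      · rw [if_neg hb, if_neg (show ¬ t - counter = 1 by omega), ih (i + 1) 0 (i + 1),
          show t - (counter + 1) = t - counter - 1 by ring]
        simp
    · by_cases h0 : x = 0 <;> (simp [aLoop2, pg, h1, h0]; apply ih)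

theorem pg_nil_noone (xs : List Int) : ∀ (i c s : Int), pg xs i c s = [] → ∀ y ∈ xs, y ≠ 1 := by
  induction xs with
  | nil => simp
  | cons x r ih =>
    intro i c s h
    by_cases h1 : x = 1
    · subst h1; simp [pg] at h
    · by_cases h0 : x = 0 <;>
      · simp only [pg, h1, h0, if_pos, if_false] at h
        intro y hy
        rcases List.mem_cons.mp hy with rfl | hy
        · exact h1
        · first
          | exact ih (i+1) (c+1) s h y hy
          | exact ih (i+1) c s h y hy

theorem aLoop3_noone (xs : List Int) : ∀ (i : Int), (∀ y ∈ xs, y ≠ 1) → aLoop3 xs i = 0 := by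
  induction xs with
  | nil => intro i _; simp [aLoop3]
  | cons x r ih =>
    intro i h
    have hx : x ≠ 1 := h x List.mem_cons_self
    simp only [aLoop3, if_neg hx]
    exact ih (i + 1) fun y hy => h y (List.mem_cons_of_mem _ hy)

theorem aLoop3_first (t : List Int) : ∀ (r : List Int) (i : Int), (∀ y ∈ t, y ≠ 1) →
    aLoop3 (t ++ 1 :: r) i = i + t.length - 1 := by
  induction t with
  | nil => intro r i _; simp [aLoop3]
  | cons x tl ih =>
    intro r i h
    have hx : x ≠ 1 := h x List.mem_cons_self
    simp only [List.cons_append, aLoop3, if_neg hx]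
    rw [ih r (i + 1) fun y hy => h y (List.mem_cons_of_mem _ hy)]
    simp only [List.length_cons]
    push_cast
    ring

theorem pg_head_s (xs : List Int) : ∀ (i c s : Int) (e : Int × Int × Int) (r : List (Int × Int × Int)),
    pg xs i c s = e :: r → e.2.1 = s := by
  induction xs with
  | nil => intro i c s e r h; simp [pg] at h
  | cons x tl ih =>
    intro i c s e r h
    by_cases h1 : x = 1
    · subst h1
      simp only [pg] at h
      rw [← (List.cons.injEq ..).mp h |>.1]
    · by_cases h0 : x = 0 <;>
        simp only [pg, h1, h0, if_false] at h <;>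
        first
          | exact ih (i+1) (c+1) s e r h
          | exact ih (i+1) c s e r h

theorem pg_peel (xs : List Int) : ∀ (i c s : Int),
    pg xs i c s = [] ∨
      ∃ (t r : List Int) (c' : Int), xs = t ++ 1 :: r ∧ (∀ y ∈ t, y ≠ 1) ∧
        pg xs i c s = (c', s, i + t.length) ::
          pg r (i + t.length + 1) 0 (i + t.length + 1) := by
  induction xs with
  | nil => intro i c s; left; simp [pg]
  | cons x tl ih =>
    intro i c s
    by_cases h1 : x = 1
    · subst h1
      right
      exact ⟨[], tl, c, by simp, by simp, by simp [pg]⟩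
    · by_cases h0 : x = 0
      · subst h0
        rcases ih (i + 1) (c + 1) s with hnil | ⟨t, r, c', hxs, ht, hpg⟩
        · left; simp [pg, h1, hnil]
        · right
          refine ⟨0 :: t, r, c', by simp [hxs], ?_, ?_⟩
          · intro y hy
            rcases List.mem_cons.mp hy with rfl | hy
            · decide
            · exact ht y hy
          · rw [show pg ((0:Int) :: tl) i c s = pg tl (i + 1) (c + 1) s from by simp [pg], hpg]
            simp only [List.length_cons]
            push_cast
            ring_nf
      · rcases ih (i + 1) c s with hnil | ⟨t, r, c', hxs, ht, hpg⟩
        · left; simp [pg, h1, h0, hnil]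
        · right
          refine ⟨x :: t, r, c', by simp [hxs], ?_, ?_⟩
          · intro y hy
            rcases List.mem_cons.mp hy with rfl | hy
            · exact h1
            · exact ht y hy
          · rw [show pg (x :: tl) i c s = pg tl (i + 1) c s from by simp [pg, h1, h0], hpg]
            simp only [List.length_cons]
            push_cast
            ring_nf

theorem pg_c_nonneg (xs : List Int) : ∀ (i c s : Int), 0 ≤ c →
    ∀ e ∈ pg xs i c s, 0 ≤ e.1 := by
  induction xs with
  | nil => intro i c s _ e he; simp [pg] at he
  | cons x tl ih =>
    intro i c s hc e he
    by_cases h1 : x = 1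
    · subst h1
      rw [show pg (1 :: tl) i c s = (c, s, i) :: pg tl (i + 1) 0 (i + 1) from by simp [pg]] at he
      rcases List.mem_cons.mp he with rfl | he
      · exact hc
      · exact ih (i + 1) 0 (i + 1) le_rfl e he
    · by_cases h0 : x = 0
      · subst h0
        rw [show pg ((0:Int) :: tl) i c s = pg tl (i + 1) (c + 1) s from by simp [pg]] at he
        exact ih (i + 1) (c + 1) s (by omega) e he
      · rw [show pg (x :: tl) i c s = pg tl (i + 1) c s from by simp [pg, h1, h0]] at he
        exact ih (i + 1) c s hc e he

theorem pg_s_ge (xs : List Int) : ∀ (i c s : Int), s ≤ i →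
    ∀ e ∈ pg xs i c s, s ≤ e.2.1 := by
  induction xs with
  | nil => intro i c s _ e he; simp [pg] at he
  | cons x tl ih =>
    intro i c s hs e he
    by_cases h1 : x = 1
    · subst h1
      rw [show pg (1 :: tl) i c s = (c, s, i) :: pg tl (i + 1) 0 (i + 1) from by simp [pg]] at he
      rcases List.mem_cons.mp he with rfl | he
      · exact le_rfl
      · exact le_trans (by omega) (ih (i + 1) 0 (i + 1) le_rfl e he)
    · by_cases h0 : x = 0
      · subst h0
        rw [show pg ((0:Int) :: tl) i c s = pg tl (i + 1) (c + 1) s from by simp [pg]] at he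
        exact ih (i + 1) (c + 1) s (by omega) e he
      · rw [show pg (x :: tl) i c s = pg tl (i + 1) c s from by simp [pg, h1, h0]] at he
        exact ih (i + 1) c s (by omega) e he

theorem posOf_nonpos (L : List (Int × Int × Int)) : ∀ (m : Int), m ≤ 0 → posOf L m = 0 := by
  induction L with
  | nil => intro m _; simp [posOf]
  | cons e r ih =>
    intro m hm
    rw [show posOf (e :: r) m = if m = 1 then e.2.2 + 1 else posOf r (m - 1) from rfl,
      if_neg (by omega)]
    exact ih (m - 1) (by omega)

theorem pg_get_zero_s (xs : List Int) (i c s : Int) (h : 0 < (pg xs i c s).length) :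
    ((pg xs i c s).get ⟨0, h⟩).2.1 = s := by
  have hne : pg xs i c s ≠ [] := by intro hn; rw [hn] at h; simp at h
  rcases List.exists_cons_of_ne_nil hne with ⟨e0, L0, hpgr⟩
  rw [List.get_of_eq hpgr]
  exact pg_head_s xs i c s e0 L0 hpgr

-- main per-entry characterisation of A's loops 2/3 (s-parameter = i throughout)
theorem keyj (j : Nat) : ∀ (xs : List Int) (i c : Int), 0 ≤ i →
    ∀ hj : j < (pg xs i c i).length,
      posOf (pg xs i c i) (j : Int) = (if j = 0 then 0 else ((pg xs i c i).get ⟨j, hj⟩).2.1) ∧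
      aLoop3 (xs.drop ((((pg xs i c i).get ⟨j, hj⟩).2.1 - i).toNat))
          (((pg xs i c i).get ⟨j, hj⟩).2.1) = ((pg xs i c i).get ⟨j, hj⟩).2.2 - 1 := by
  induction j with
  | zero =>
    intro xs i c hi hj
    rcases pg_peel xs i c i with hnil | ⟨t, r, c', hxs, ht, hpg⟩
    · rw [hnil] at hj; simp at hj
    · refine ⟨by simp [posOf_nonpos _ 0 le_rfl], ?_⟩
      have hget : (pg xs i c i).get ⟨0, hj⟩ = (c', i, i + (t.length : Int)) := by
        rw [List.get_of_eq hpg]; rfl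
      rw [hget]
      show aLoop3 (xs.drop ((i - i).toNat)) i = (i + (t.length : Int)) - 1
      rw [show (i - i).toNat = 0 by omega, List.drop_zero, hxs]
      exact aLoop3_first t r i ht
  | succ j ih =>
    intro xs i c hi hj
    rcases pg_peel xs i c i with hnil | ⟨t, r, c', hxs, ht, hpg⟩
    · rw [hnil] at hj; simp at hj
    · have hlen : (0 : Int) ≤ (t.length : Int) := Int.natCast_nonneg _
      have hi0' : 0 ≤ i + (t.length : Int) + 1 := by omega
      have hj' : j < (pg r (i + (t.length : Int) + 1) 0 (i + (t.length : Int) + 1)).length := by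
        have h2 := hj; rw [hpg] at h2; simpa using h2
      have hget : (pg xs i c i).get ⟨j + 1, hj⟩ =
          (pg r (i + (t.length : Int) + 1) 0 (i + (t.length : Int) + 1)).get ⟨j, hj'⟩ := by
        rw [List.get_of_eq hpg]; rfl
      have IH := ih r (i + (t.length : Int) + 1) 0 hi0' hj'
      have hmem : (pg r (i + (t.length : Int) + 1) 0 (i + (t.length : Int) + 1)).get ⟨j, hj'⟩ ∈
          pg r (i + (t.length : Int) + 1) 0 (i + (t.length : Int) + 1) := List.get_mem _ _
      have hes := pg_s_ge r (i + (t.length : Int) + 1) 0 (i + (t.length : Int) + 1) le_rfl _ hmem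
      constructor
      · rw [if_neg (Nat.succ_ne_zero j), hget]
        rw [hpg]
        show (if ((j + 1 : Nat) : Int) = 1 then (i + (t.length : Int)) + 1
              else posOf (pg r (i + (t.length : Int) + 1) 0 (i + (t.length : Int) + 1)) (((j + 1 : Nat) : Int) - 1)) = _
        by_cases hj0 : j = 0
        · subst hj0
          rw [if_pos (by norm_num)]
          exact (pg_get_zero_s r _ 0 _ hj').symm
        · rw [if_neg (by push_cast; omega), show ((j + 1 : Nat) : Int) - 1 = (j : Int) by push_cast; ring,
            IH.1, if_neg hj0]
      · rw [hget]
        have hsplit : xs.drop ((((pg r (i + (t.length : Int) + 1) 0 (i + (t.length : Int) + 1)).get ⟨j, hj'⟩).2.1 - i).toNat) =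
            r.drop ((((pg r (i + (t.length : Int) + 1) 0 (i + (t.length : Int) + 1)).get ⟨j, hj'⟩).2.1 - (i + (t.length : Int) + 1)).toNat) := by
          rw [hxs, show t ++ 1 :: r = (t ++ [1]) ++ r from by simp]
          rw [show ((((pg r (i + (t.length : Int) + 1) 0 (i + (t.length : Int) + 1)).get ⟨j, hj'⟩).2.1 - i).toNat) =
              (t ++ [1]).length + ((((pg r (i + (t.length : Int) + 1) 0 (i + (t.length : Int) + 1)).get ⟨j, hj'⟩).2.1 - (i + (t.length : Int) + 1)).toNat) from by
            simp only [List.length_append, List.length_cons, List.length_nil]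
            omega]
          exact List.drop_length_add_append _
        rw [hsplit]
        exact IH.2

theorem ordref (L : List (Int × Int × Int)) : ∀ (idx ci mx bc : Int) (best : Int × Int)
    (E : Int → Int × Int), mx = bc → E ci = best →
    (∀ (j : Nat) (hj : j < L.length), E (idx + j) = ((L.get ⟨j, hj⟩).2.1, (L.get ⟨j, hj⟩).2.2 - 1)) →
    E (ordGo L idx ci mx) = refGo L bc best := by
  induction L with
  | nil =>
    intro idx ci mx bc best E _ hE _
    simpa [ordGo, refGo] using hE
  | cons e r ih =>
    intro idx ci mx bc best E hmx hE hall
    subst hmx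
    by_cases h : e.1 > mx
    · rw [show ordGo (e :: r) idx ci mx = ordGo r (idx + 1) idx e.1 from by simp [ordGo, h],
        show refGo (e :: r) mx best = refGo r e.1 (e.2.1, e.2.2 - 1) from by simp [refGo, h]]
      refine ih (idx + 1) idx e.1 e.1 (e.2.1, e.2.2 - 1) E rfl ?_ ?_
      · have h0 := hall 0 (by simp)
        simpa using h0
      · intro j hj
        have hs := hall (j + 1) (by simpa using Nat.succ_lt_succ hj)
        rw [show idx + ((j + 1 : Nat) : Int) = (idx + 1) + (j : Int) by push_cast; ring] at hs
        exact hs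
    · rw [show ordGo (e :: r) idx ci mx = ordGo r (idx + 1) ci mx from by simp [ordGo, h],
        show refGo (e :: r) mx best = refGo r mx best from by simp [refGo, h]]
      refine ih (idx + 1) ci mx mx best E rfl hE ?_
      intro j hj
      have hs := hall (j + 1) (by simpa using Nat.succ_lt_succ hj)
      rw [show idx + ((j + 1 : Nat) : Int) = (idx + 1) + (j : Int) by push_cast; ring] at hs
      exact hs

theorem main_eq (xs : List Int) : FindMaxEmptySpace xs = FindMaxEmptySpace_alt xs := by
  rw [alt_eq]
  have ha2 : ∀ m : Int, aLoop2 xs 0 0 m = posOf (pg xs 0 0 0) m := by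
    intro m
    simpa using a2 xs 0 0 0 0 m
  have ha1 : (aLoop1 xs (0, 0, 0, 0)).1 = ordGo (pg xs 0 0 0) 0 0 0 := a1 xs 0 0 0 0 0 0
  have hunf : FindMaxEmptySpace xs =
      (aLoop2 xs 0 0 ((aLoop1 xs (0, 0, 0, 0)).1),
       aLoop3 (xs.drop (aLoop2 xs 0 0 ((aLoop1 xs (0, 0, 0, 0)).1)).toNat)
         (aLoop2 xs 0 0 ((aLoop1 xs (0, 0, 0, 0)).1))) := rfl
  rw [hunf, ha1]
  cases hL : pg xs 0 0 0 with
  | nil =>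
    have h0 : aLoop2 xs 0 0 (ordGo ([] : List (Int × Int × Int)) 0 0 0) = 0 := by
      rw [show ordGo ([] : List (Int × Int × Int)) 0 0 0 = 0 from rfl, ha2 0, hL]
      rfl
    rw [h0]
    rw [show ((0 : Int).toNat) = 0 from rfl, List.drop_zero]
    rw [aLoop3_noone xs 0 (pg_nil_noone xs 0 0 0 hL)]
  | cons e L' =>
    have hc0 : 0 ≤ e.1 :=
      pg_c_nonneg xs 0 0 0 le_rfl e (by rw [hL]; exact List.mem_cons_self)
    have hci : ordGo (e :: L') 0 0 0 = ordGo L' 1 0 e.1 := by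
      by_cases h : e.1 > 0
      · simp [ordGo, h]
      · have he0 : e.1 = 0 := le_antisymm (not_lt.mp h) hc0
        simp [ordGo, h]
        rw [he0]
    have hs0 : e.2.1 = 0 := pg_head_s xs 0 0 0 e L' hL
    have hlen0 : 0 < (pg xs 0 0 0).length := by rw [hL]; simp
    have hE0 : (fun m : Int => (posOf (pg xs 0 0 0) m,
        aLoop3 (xs.drop (posOf (pg xs 0 0 0) m).toNat) (posOf (pg xs 0 0 0) m))) 0 =
        (e.2.1, e.2.2 - 1) := by
      have hk := (keyj 0 xs 0 0 le_rfl hlen0).2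
      have hg : (pg xs 0 0 0).get ⟨0, hlen0⟩ = e := by rw [List.get_of_eq hL]; rfl
      rw [hg] at hk
      have hp0 : posOf (pg xs 0 0 0) 0 = 0 := posOf_nonpos _ 0 le_rfl
      show (posOf (pg xs 0 0 0) 0, aLoop3 (xs.drop (posOf (pg xs 0 0 0) 0).toNat)
        (posOf (pg xs 0 0 0) 0)) = (e.2.1, e.2.2 - 1)
      rw [hp0, hs0.symm]
      rw [show ((e.2.1 : Int)).toNat = (e.2.1 - 0).toNat from by rw [sub_zero]]
      exact Prod.ext rfl hk
    have hEj : ∀ (j : Nat) (hj : j < L'.length),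
        (fun m : Int => (posOf (pg xs 0 0 0) m,
          aLoop3 (xs.drop (posOf (pg xs 0 0 0) m).toNat) (posOf (pg xs 0 0 0) m))) (1 + (j : Int)) =
        ((L'.get ⟨j, hj⟩).2.1, (L'.get ⟨j, hj⟩).2.2 - 1) := by
      intro j hj
      have hj1 : j + 1 < (pg xs 0 0 0).length := by rw [hL]; simpa using Nat.succ_lt_succ hj
      have hk := keyj (j + 1) xs 0 0 le_rfl hj1
      have hg : (pg xs 0 0 0).get ⟨j + 1, hj1⟩ = L'.get ⟨j, hj⟩ := by
        rw [List.get_of_eq hL]; rfl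
      rw [hg] at hk
      have hp : posOf (pg xs 0 0 0) (1 + (j : Int)) = (L'.get ⟨j, hj⟩).2.1 := by
        rw [show (1 : Int) + (j : Int) = ((j + 1 : Nat) : Int) from by push_cast; ring, hk.1,
          if_neg (Nat.succ_ne_zero j)]
      show (posOf (pg xs 0 0 0) (1 + (j : Int)),
        aLoop3 (xs.drop (posOf (pg xs 0 0 0) (1 + (j : Int))).toNat)
          (posOf (pg xs 0 0 0) (1 + (j : Int)))) = _
      rw [hp]
      refine Prod.ext rfl ?_
      have hk2 := hk.2
      rw [show ((L'.get ⟨j, hj⟩).2.1 - 0).toNat = ((L'.get ⟨j, hj⟩).2.1).toNat from by rw [sub_zero]] at hk2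
      exact hk2
    have hmain := ordref L' 1 0 e.1 e.1 (e.2.1, e.2.2 - 1)
      (fun m : Int => (posOf (pg xs 0 0 0) m,
        aLoop3 (xs.drop (posOf (pg xs 0 0 0) m).toNat) (posOf (pg xs 0 0 0) m)))
      rfl hE0 hEj
    rw [hci]
    calc (aLoop2 xs 0 0 (ordGo L' 1 0 e.1),
        aLoop3 (xs.drop (aLoop2 xs 0 0 (ordGo L' 1 0 e.1)).toNat)
          (aLoop2 xs 0 0 (ordGo L' 1 0 e.1)))
        = (posOf (pg xs 0 0 0) (ordGo L' 1 0 e.1),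
            aLoop3 (xs.drop (posOf (pg xs 0 0 0) (ordGo L' 1 0 e.1)).toNat)
              (posOf (pg xs 0 0 0) (ordGo L' 1 0 e.1))) := by rw [ha2]
      _ = refGo L' e.1 (e.2.1, e.2.2 - 1) := hmain

-- ===== VERDICT (by name: the statement is the Claim_ definition above) =====
theorem FindMaxEmptySpace_spec : Claim_equal_FindMaxEmptySpace := by
  intro list _
  exact main_eq list
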